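-- pv_equiv track=rewrite | github.com/yuesuLi/RadarRGBFusionNetFinal | Track/linear_assignment.py | __get_conflicting_tracks
-- ===== SOURCE A (Python) =====
-- def __get_conflicting_tracks(track_detections):
--     conflicting_tracks = []     # n=1, so prune from current frame, examine whether have conflict
--     for i in range(len(track_detections)):
--         for j in range(i + 1, len(track_detections)):   # from i+1 to len(track_detections)
--             left_ids = track_detections[i]
--             right_ids = track_detections[j]
--             for k in range(len(left_ids)):
--                 if left_ids[k] != '' and right_ids[k] != '' and left_ids[k] == right_ids[k]:
--                     conflicting_tracks.append((i, j))   # if left != right, conflict exist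
--
--     return conflicting_tracks
-- ===== SOURCE B (Python) =====
-- def __get_conflicting_tracks(track_detections):
--     # group row indices by id value per position; conflicts are pairs within a group; sort once
--     n = len(track_detections)
--     width = 0
--     for row in track_detections:
--         if len(row) > width:
--             width = len(row)
--     pairs = []
--     for k in range(width):
--         groups = {}
--         for i in range(n):
--             row = track_detections[i]
--             if k < len(row) and row[k] != '':
--                 groups.setdefault(row[k], []).append(i)
--         for ids in groups.values():
--             for a in range(len(ids)):
--                 for b in range(a + 1, len(ids)):
--                     pairs.append((ids[a], ids[b]))
--     pairs.sort()
--     return pairs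
-- ===== Notes on version B (the rewrite author's own statement) =====
-- stated objective: alternative
-- what changed: A compares every pair of tracks position by position; B instead groups track indices by id value per position with a dict, emits pairs only within each group, and sorts the collected pairs once (Python's stable tuple sort reproduces A's (i,j)-then-position emission order exactly).
import Mathlib
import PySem

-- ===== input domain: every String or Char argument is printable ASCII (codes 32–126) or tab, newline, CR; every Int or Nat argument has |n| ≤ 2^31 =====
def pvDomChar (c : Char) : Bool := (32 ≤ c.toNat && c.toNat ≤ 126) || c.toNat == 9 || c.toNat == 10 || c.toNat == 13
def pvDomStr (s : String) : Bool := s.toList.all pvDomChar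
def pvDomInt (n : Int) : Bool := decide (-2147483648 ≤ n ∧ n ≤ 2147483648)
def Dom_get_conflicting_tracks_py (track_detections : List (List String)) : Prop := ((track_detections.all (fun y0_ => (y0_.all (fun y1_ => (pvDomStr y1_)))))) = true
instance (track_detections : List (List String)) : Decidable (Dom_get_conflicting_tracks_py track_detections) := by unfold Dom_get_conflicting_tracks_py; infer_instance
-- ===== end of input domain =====

-- B replaces A's pair-by-pair scan with per-position hash grouping of equal ids followed by one sort of the collected pairs (objective: alternative).

-- ===== PORT A =====
-- literal port of A's nested loops; Python's right_ids[k] raises IndexError when k ≥ len(right_ids)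
-- (exactly the inputs excluded by Pre_ below); pyGetD's default is only reached outside Pre_.
def get_conflicting_tracks_py (track_detections : List (List String)) : List (Int × Int) :=
  (PySem.List.pyRange 0 (track_detections.length : Int)).foldl (fun acc i =>
    (PySem.List.pyRange (i + 1) (track_detections.length : Int)).foldl (fun acc j =>
      let left_ids := PySem.List.pyGetD track_detections i []
      let right_ids := PySem.List.pyGetD track_detections j []
      (PySem.List.pyRange 0 (left_ids.length : Int)).foldl (fun acc k =>
        if PySem.List.pyGetD left_ids k "" ≠ "" ∧ PySem.List.pyGetD right_ids k "" ≠ "" ∧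
            PySem.List.pyGetD left_ids k "" = PySem.List.pyGetD right_ids k "" then
          acc ++ [(i, j)]
        else acc) acc) acc) []

-- ===== PORT B =====
-- literal port of Source B; Python's `pairs.sort()` on int pairs is PySem's stable sort under the
-- lexicographic key `toLex` (exactly Python's tuple comparison on (int, int)).
def get_conflicting_tracks_py_alt (track_detections : List (List String)) : List (Int × Int) :=
  let n : Int := (track_detections.length : Int)
  let width : Int := track_detections.foldl
    (fun w row => if w < (row.length : Int) then (row.length : Int) else w) 0
  let pairs : List (Int × Int) :=
    (PySem.List.pyRange 0 width).foldl (fun pairs k =>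
      let groups : PySem.Dict String (List Int) :=
        (PySem.List.pyRange 0 n).foldl (fun g i =>
          let row := PySem.List.pyGetD track_detections i []
          if k < (row.length : Int) ∧ PySem.List.pyGetD row k "" ≠ "" then
            g.modify (PySem.List.pyGetD row k "") [] (· ++ [i])
          else g) PySem.Dict.empty
      groups.values.foldl (fun pairs ids =>
        (PySem.List.pyRange 0 (ids.length : Int)).foldl (fun pairs a =>
          (PySem.List.pyRange (a + 1) (ids.length : Int)).foldl (fun pairs b =>
            pairs ++ [(PySem.List.pyGetD ids a 0, PySem.List.pyGetD ids b 0)]) pairs) pairs) pairs) []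
  PySem.List.sorted pairs (fun p => toLex p) false

-- ===== PRECONDITION & SPEC =====
-- Pre_ excludes exactly the inputs where Python A raises IndexError: some row i has a non-empty id
-- at a position k that a later row j does not reach (right_ids[k] is out of range).
def Pre_get_conflicting_tracks_py (track_detections : List (List String)) : Prop :=
  ∀ i < track_detections.length, ∀ j < track_detections.length, i < j →
    ∀ k < (track_detections.getD i []).length,
      (track_detections.getD i []).getD k "" ≠ "" → k < (track_detections.getD j []).length
instance (track_detections : List (List String)) : Decidable (Pre_get_conflicting_tracks_py track_detections) := by unfold Pre_get_conflicting_tracks_py; exact Nat.decidableBallLT _ _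

def pvWitness_get_conflicting_tracks_py : List (List String) := [["a", "b"], ["a", ""], ["", "b"]]

def Spec_get_conflicting_tracks_py (track_detections : List (List String)) (out : List (Int × Int)) : Prop := out = get_conflicting_tracks_py_alt track_detections
instance (track_detections : List (List String)) (out : List (Int × Int)) : Decidable (Spec_get_conflicting_tracks_py track_detections out) := by unfold Spec_get_conflicting_tracks_py; infer_instance

-- ===== CLAIM (what is proved, stated in full; the proofs are below) =====
def Claim_equal_get_conflicting_tracks_py : Prop := ∀ (track_detections : List (List String)), Dom_get_conflicting_tracks_py track_detections → Pre_get_conflicting_tracks_py track_detections → Spec_get_conflicting_tracks_py track_detections (get_conflicting_tracks_py track_detections)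

-- ===== LEMMAS AND PROOFS =====

-- shorthands for the proofs
def pvN (td : List (List String)) : Int := (td.length : Int)
def pvRow (td : List (List String)) (i : Int) : List String := PySem.List.pyGetD td i []
def pvCell (td : List (List String)) (i k : Int) : String := PySem.List.pyGetD (pvRow td i) k ""
def pvWidth (td : List (List String)) : Int :=
  td.foldl (fun w row => if w < (row.length : Int) then (row.length : Int) else w) 0

-- the canonical triple list behind A's output, in A's emission order
def pvTAj (td : List (List String)) (i j : Int) : List (Int × Int × Int) :=
  ((PySem.List.pyRange 0 ((pvRow td i).length : Int)).filter (fun k =>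
    decide (pvCell td i k ≠ "" ∧ pvCell td j k ≠ "" ∧ pvCell td i k = pvCell td j k))).map
    (fun k => (i, j, k))
def pvTAi (td : List (List String)) (i : Int) : List (Int × Int × Int) :=
  (PySem.List.pyRange (i + 1) (pvN td)).flatMap (pvTAj td i)
def pvTA (td : List (List String)) : List (Int × Int × Int) :=
  (PySem.List.pyRange 0 (pvN td)).flatMap (pvTAi td)

def pvCands (td : List (List String)) (k : Int) : List Int :=
  (PySem.List.pyRange 0 (pvN td)).filter (fun i =>
    decide (k < ((pvRow td i).length : Int) ∧ pvCell td i k ≠ ""))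
def pvGrp (td : List (List String)) (k : Int) (c : String) : List Int :=
  (pvCands td k).filter (fun i => pvCell td i k == c)
def pvKys (td : List (List String)) (k : Int) : List String :=
  PySem.Set.ofList ((pvCands td k).map (fun i => pvCell td i k))
def pvAllPairs (ids : List Int) : List (Int × Int) :=
  (PySem.List.pyRange 0 (ids.length : Int)).flatMap (fun a =>
    (PySem.List.pyRange (a + 1) (ids.length : Int)).map (fun b =>
      (PySem.List.pyGetD ids a 0, PySem.List.pyGetD ids b 0)))

-- the canonical triple list behind B's pre-sort pairs, in B's emission order
def pvTBc (td : List (List String)) (k : Int) (c : String) : List (Int × Int × Int) :=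
  (pvAllPairs (pvGrp td k c)).map (fun p => (p.1, p.2, k))
def pvTBk (td : List (List String)) (k : Int) : List (Int × Int × Int) :=
  (pvKys td k).flatMap (pvTBc td k)
def pvTB (td : List (List String)) : List (Int × Int × Int) :=
  (PySem.List.pyRange 0 (pvWidth td)).flatMap (pvTBk td)

-- the common membership condition of pvTA and pvTB
def pvCond (td : List (List String)) (x y k : Int) : Prop :=
  0 ≤ x ∧ x < y ∧ y < pvN td ∧ 0 ≤ k ∧
  k < ((pvRow td x).length : Int) ∧ k < ((pvRow td y).length : Int) ∧
  pvCell td x k ≠ "" ∧ pvCell td y k ≠ "" ∧ pvCell td x k = pvCell td y k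

lemma pv_foldl_ite_skip {α β : Type} (p : α → Prop) [DecidablePred p] (f : β → α → β)
    (l : List α) (init : β) :
    l.foldl (fun acc x => if p x then f acc x else acc) init
      = (l.filter (fun x => decide (p x))).foldl f init := by
  induction l generalizing init with
  | nil => rfl
  | cons hd tl ih =>
    by_cases h : p hd <;> simp [h, ih]

-- ----- shape of A -----
lemma pvA_shape (td : List (List String)) :
    get_conflicting_tracks_py td = (pvTA td).map (fun t => (t.1, t.2.1)) := by
  unfold get_conflicting_tracks_py pvTA pvTAi pvTAj pvN pvCell
  simp only [PySem.List.foldl_append_ite, PySem.List.foldl_append_eq_flatMap,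
    List.map_flatMap, List.map_map, List.nil_append, Function.comp_def, pvRow]
  rfl

-- ----- shape of B -----
lemma pv_gdict_values (td : List (List String)) (k : Int) :
    ((PySem.List.pyRange 0 (pvN td)).foldl (fun g i =>
        if k < ((PySem.List.pyGetD td i []).length : Int) ∧
            PySem.List.pyGetD (PySem.List.pyGetD td i []) k "" ≠ "" then
          g.modify (PySem.List.pyGetD (PySem.List.pyGetD td i []) k "") [] (· ++ [i])
        else g) PySem.Dict.empty).values
      = (pvKys td k).map (fun c => pvGrp td k c) := by
  rw [pv_foldl_ite_skip (p := fun i : Int => k < ((PySem.List.pyGetD td i []).length : Int) ∧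
    PySem.List.pyGetD (PySem.List.pyGetD td i []) k "" ≠ "")]
  have hc : ((PySem.List.pyRange 0 (pvN td)).filter (fun i =>
      decide (k < ((PySem.List.pyGetD td i []).length : Int) ∧
        PySem.List.pyGetD (PySem.List.pyGetD td i []) k "" ≠ ""))) = pvCands td k := rfl
  rw [hc, show (fun (g : PySem.Dict String (List Int)) (i : Int) =>
        g.modify (PySem.List.pyGetD (PySem.List.pyGetD td i []) k "") [] (· ++ [i]))
      = (fun g i => g.modify (pvCell td i k) [] (· ++ [i])) from rfl,
    ← List.foldl_map (f := fun i : Int => (pvCell td i k, i))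
      (g := fun (g : PySem.Dict String (List Int)) p => g.modify p.1 [] (· ++ [p.2]))]
  have hkeys : (((pvCands td k).map (fun i => (pvCell td i k, i))).foldl
      (fun (g : PySem.Dict String (List Int)) p => g.modify p.1 [] (· ++ [p.2]))
      PySem.Dict.empty).keys = pvKys td k := by
    rw [PySem.Dict.keys_foldl_modify_key ((pvCands td k).map (fun i => (pvCell td i k, i)))
      (fun p : String × Int => p.1) ([] : List Int)
      (fun _ (p : String × Int) => (· ++ [p.2])) PySem.Dict.empty]
    rw [PySem.Dict.keys_empty, List.map_map]
    exact PySem.Set.update_empty _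
  have hnd : (((pvCands td k).map (fun i => (pvCell td i k, i))).foldl
      (fun (g : PySem.Dict String (List Int)) p => g.modify p.1 [] (· ++ [p.2]))
      PySem.Dict.empty).keys.Nodup := by
    exact PySem.Dict.nodup_keys_foldl_modify_key ((pvCands td k).map (fun i => (pvCell td i k, i)))
      (fun p : String × Int => p.1) ([] : List Int)
      (fun _ (p : String × Int) => (· ++ [p.2])) PySem.Dict.empty
      PySem.Dict.nodup_keys_empty
  rw [PySem.Dict.values_eq_map_keys _ hnd [], hkeys]
  refine List.map_congr_left (fun c _ => ?_)
  rw [PySem.Dict.getD_foldl_modify_append, PySem.Dict.getD_empty, List.nil_append,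
    List.filter_map, List.map_map]
  unfold pvGrp
  simp [Function.comp_def]

lemma pvB_shape (td : List (List String)) :
    get_conflicting_tracks_py_alt td
      = PySem.List.sorted ((pvTB td).map (fun t => (t.1, t.2.1))) (fun p => toLex p) false := by
  unfold get_conflicting_tracks_py_alt
  congr 1
  have hrw : ∀ k : Int, ((PySem.List.pyRange 0 ((td.length : Int))).foldl (fun g i =>
        if k < ((PySem.List.pyGetD td i []).length : Int) ∧
            PySem.List.pyGetD (PySem.List.pyGetD td i []) k "" ≠ "" then
          g.modify (PySem.List.pyGetD (PySem.List.pyGetD td i []) k "") [] (· ++ [i])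
        else g) PySem.Dict.empty).values
      = (pvKys td k).map (fun c => pvGrp td k c) := fun k => pv_gdict_values td k
  simp only [hrw]
  unfold pvTB pvTBk pvTBc pvAllPairs
  simp only [PySem.List.foldl_append_singleton_eq_map, PySem.List.foldl_append_eq_flatMap,
    List.map_flatMap, List.map_map, List.nil_append, Function.comp_def, List.flatMap_map,
    Prod.mk.eta, List.map_id]
  rfl

-- ----- width bounds -----
lemma pv_width_foldl_init_le (l : List (List String)) (w : Int) :
    w ≤ l.foldl (fun w row => if w < (row.length : Int) then (row.length : Int) else w) w := by
  induction l generalizing w with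
  | nil => simp
  | cons hd tl ih =>
    simp only [List.foldl_cons]
    refine le_trans ?_ (ih _)
    split <;> omega

lemma pv_width_foldl_row_le (l : List (List String)) (w : Int) :
    ∀ row ∈ l, (row.length : Int)
      ≤ l.foldl (fun w row => if w < (row.length : Int) then (row.length : Int) else w) w := by
  induction l generalizing w with
  | nil => simp
  | cons hd tl ih =>
    intro row hrow
    simp only [List.foldl_cons]
    rcases List.mem_cons.1 hrow with h | h
    · subst h
      refine le_trans ?_ (pv_width_foldl_init_le tl _)
      split <;> omega
    · exact ih _ row h

lemma pv_row_le_width (td : List (List String)) (i : Int) (h0 : 0 ≤ i) (h1 : i < pvN td) :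
    ((pvRow td i).length : Int) ≤ pvWidth td := by
  apply pv_width_foldl_row_le
  unfold pvRow
  rw [PySem.List.pyGetD_eq_getElem td [] h0 h1]
  exact List.getElem_mem _

lemma pv_cell_ne_imp_lt (td : List (List String)) (i k : Int) (hk : 0 ≤ k)
    (h : pvCell td i k ≠ "") : k < ((pvRow td i).length : Int) := by
  by_contra hlt
  push_neg at hlt
  apply h
  unfold pvCell
  rw [PySem.List.pyGetD_of_nonneg _ _ hk]
  exact List.getD_eq_default _ _ (by omega)

-- ----- membership characterisations -----
lemma pvA_mem (td : List (List String)) (x y k : Int) :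
    (x, y, k) ∈ pvTA td ↔ pvCond td x y k := by
  unfold pvTA pvTAi pvTAj pvCond
  simp only [List.mem_flatMap, List.mem_map, List.mem_filter,
    PySem.List.mem_pyRange_one, decide_eq_true_eq, Prod.mk.injEq]
  constructor
  · rintro ⟨i, ⟨hi0, hin⟩, j, ⟨hij, hjn⟩, kk, ⟨⟨hk0, hkl⟩, hne1, hne2, heq⟩, hxi, hyj, hkk⟩
    subst hxi; subst hyj; subst hkk
    exact ⟨hi0, by omega, hjn, hk0, hkl, pv_cell_ne_imp_lt td _ _ hk0 hne2, hne1, hne2, heq⟩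
  · rintro ⟨hx0, hxy, hyn, hk0, hkx, _hky, hne1, hne2, heq⟩
    exact ⟨x, ⟨hx0, by omega⟩, y, ⟨by omega, hyn⟩, k, ⟨⟨hk0, hkx⟩, hne1, hne2, heq⟩, rfl, rfl, rfl⟩

lemma pv_mem_cands (td : List (List String)) (k x : Int) :
    x ∈ pvCands td k ↔ (0 ≤ x ∧ x < pvN td) ∧
      k < ((pvRow td x).length : Int) ∧ pvCell td x k ≠ "" := by
  unfold pvCands
  simp [List.mem_filter, PySem.List.mem_pyRange_one]

lemma pv_mem_grp (td : List (List String)) (k : Int) (c : String) (x : Int) :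
    x ∈ pvGrp td k c ↔ ((0 ≤ x ∧ x < pvN td) ∧
      k < ((pvRow td x).length : Int) ∧ pvCell td x k ≠ "") ∧ pvCell td x k = c := by
  unfold pvGrp
  simp [List.mem_filter, pv_mem_cands]

lemma pv_mem_kys (td : List (List String)) (k : Int) (c : String) :
    c ∈ pvKys td k ↔ ∃ i, ((0 ≤ i ∧ i < pvN td) ∧
      k < ((pvRow td i).length : Int) ∧ pvCell td i k ≠ "") ∧ pvCell td i k = c := by
  unfold pvKys
  simp [PySem.Set.mem_ofList, List.mem_map, pv_mem_cands]

lemma pv_grp_sorted (td : List (List String)) (k : Int) (c : String) :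
    List.Pairwise (· < ·) (pvGrp td k c) := by
  unfold pvGrp pvCands
  exact List.Pairwise.sublist (List.filter_sublist.trans List.filter_sublist)
    (PySem.List.pairwise_lt_pyRange_one 0 (pvN td))

lemma pv_mem_allPairs (ids : List Int) (hs : List.Pairwise (· < ·) ids) (x y : Int) :
    (x, y) ∈ pvAllPairs ids ↔ x ∈ ids ∧ y ∈ ids ∧ x < y := by
  unfold pvAllPairs
  simp only [List.mem_flatMap, List.mem_map, PySem.List.mem_pyRange_one]
  constructor
  · rintro ⟨a, ⟨ha0, hal⟩, b, ⟨hab, hbl⟩, heq⟩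
    have hb0 : 0 ≤ b := by omega
    have hal' : a.toNat < ids.length := by omega
    have hbl' : b.toNat < ids.length := by omega
    rw [PySem.List.pyGetD_eq_getElem ids 0 ha0 hal,
      PySem.List.pyGetD_eq_getElem ids 0 hb0 hbl] at heq
    cases heq
    refine ⟨List.getElem_mem _, List.getElem_mem _, ?_⟩
    exact List.pairwise_iff_getElem.1 hs _ _ hal' hbl' (by omega)
  · rintro ⟨hx, hy, hxy⟩
    obtain ⟨a, ha, hxa⟩ := List.mem_iff_getElem.1 hx
    obtain ⟨b, hb, hyb⟩ := List.mem_iff_getElem.1 hy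
    have hab : a < b := by
      rcases lt_trichotomy a b with h | h | h
      · exact h
      · exfalso; subst h; rw [hxa] at hyb; omega
      · exfalso
        have := List.pairwise_iff_getElem.1 hs b a hb ha h
        rw [hxa, hyb] at this; omega
    refine ⟨(a : Int), ⟨by omega, by omega⟩, (b : Int), ⟨by omega, by omega⟩, ?_⟩
    rw [PySem.List.pyGetD_eq_getElem ids 0 (by omega) (by omega),
      PySem.List.pyGetD_eq_getElem ids 0 (by omega) (by omega)]
    simp only [Int.toNat_natCast]
    rw [hxa, hyb]

lemma pvB_mem (td : List (List String)) (x y k : Int) :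
    (x, y, k) ∈ pvTB td ↔ pvCond td x y k := by
  unfold pvTB pvTBk pvTBc
  simp only [List.mem_flatMap, List.mem_map, PySem.List.mem_pyRange_one, Prod.mk.injEq]
  constructor
  · rintro ⟨kk, ⟨hk0, _hkw⟩, c, hc, p, hp, hp1, hp2, hkk⟩
    rw [hkk] at hk0 hp
    have hp' : (x, y) ∈ pvAllPairs (pvGrp td k c) := by
      rw [← hp1, ← hp2]; simpa using hp
    obtain ⟨hx, hy, hxy⟩ := (pv_mem_allPairs _ (pv_grp_sorted td k c) x y).1 hp'
    obtain ⟨⟨⟨hx0, hxn⟩, hkx, hnex⟩, hcx⟩ := (pv_mem_grp td k c x).1 hx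
    obtain ⟨⟨⟨_hy0, hyn⟩, hky, hney⟩, hcy⟩ := (pv_mem_grp td k c y).1 hy
    exact ⟨hx0, hxy, hyn, hk0, hkx, hky, hnex, hney, hcx.trans hcy.symm⟩
  · rintro ⟨hx0, hxy, hyn, hk0, hkx, hky, hnex, hney, heq⟩
    refine ⟨k, ⟨hk0, lt_of_lt_of_le hkx (pv_row_le_width td x hx0 (by omega))⟩,
      pvCell td x k, ?_, (x, y), ?_, rfl, rfl, rfl⟩
    · exact (pv_mem_kys td k _).2 ⟨x, ⟨⟨hx0, by omega⟩, hkx, hnex⟩, rfl⟩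
    · refine (pv_mem_allPairs _ (pv_grp_sorted td k _) x y).2 ⟨?_, ?_, hxy⟩
      · exact (pv_mem_grp td k _ x).2 ⟨⟨⟨hx0, by omega⟩, hkx, hnex⟩, rfl⟩
      · exact (pv_mem_grp td k _ y).2 ⟨⟨⟨by omega, hyn⟩, hky, hney⟩, heq.symm⟩

-- ----- element shapes -----
lemma pv_mem_pvTAj (td : List (List String)) (i j : Int) (t : Int × Int × Int)
    (h : t ∈ pvTAj td i j) : t.1 = i ∧ t.2.1 = j := by
  unfold pvTAj at h
  obtain ⟨k, _, rfl⟩ := List.mem_map.1 h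
  exact ⟨rfl, rfl⟩

lemma pv_mem_pvTAi (td : List (List String)) (i : Int) (t : Int × Int × Int)
    (h : t ∈ pvTAi td i) : t.1 = i := by
  unfold pvTAi at h
  obtain ⟨j, _, hj⟩ := List.mem_flatMap.1 h
  exact (pv_mem_pvTAj td i j t hj).1

lemma pv_mem_allPairs_fst (ids : List Int) (p : Int × Int) (h : p ∈ pvAllPairs ids) :
    p.1 ∈ ids ∧ p.2 ∈ ids := by
  unfold pvAllPairs at h
  simp only [List.mem_flatMap, List.mem_map, PySem.List.mem_pyRange_one] at h
  obtain ⟨a, ⟨ha0, hal⟩, b, ⟨hab, hbl⟩, rfl⟩ := h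
  constructor
  · rw [PySem.List.pyGetD_eq_getElem ids 0 ha0 hal]; exact List.getElem_mem _
  · rw [PySem.List.pyGetD_eq_getElem ids 0 (by omega) hbl]; exact List.getElem_mem _

lemma pv_mem_pvTBc (td : List (List String)) (k : Int) (c : String) (t : Int × Int × Int)
    (h : t ∈ pvTBc td k c) : t.2.2 = k ∧ pvCell td t.1 k = c := by
  unfold pvTBc at h
  obtain ⟨p, hp, rfl⟩ := List.mem_map.1 h
  refine ⟨rfl, ?_⟩
  have := (pv_mem_allPairs_fst _ p hp).1
  exact ((pv_mem_grp td k c p.1).1 this).2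

lemma pv_mem_pvTBk (td : List (List String)) (k : Int) (t : Int × Int × Int)
    (h : t ∈ pvTBk td k) : t.2.2 = k := by
  unfold pvTBk at h
  obtain ⟨c, _, hc⟩ := List.mem_flatMap.1 h
  exact (pv_mem_pvTBc td k c t hc).1

-- ----- nodup -----
lemma pvA_nodup (td : List (List String)) : (pvTA td).Nodup := by
  unfold pvTA
  rw [List.nodup_flatMap]
  constructor
  · intro i _
    unfold pvTAi
    rw [List.nodup_flatMap]
    constructor
    · intro j _
      unfold pvTAj
      refine List.Nodup.map_on ?_ (List.Nodup.filter _ (PySem.List.nodup_pyRange_one _ _))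
      intro a _ b _ hab
      simpa using hab
    · refine (PySem.List.pairwise_lt_pyRange_one _ _).imp ?_
      intro j j' hjj' t ht ht'
      have h1 := (pv_mem_pvTAj td i j t ht).2
      have h2 := (pv_mem_pvTAj td i j' t ht').2
      omega
  · refine (PySem.List.pairwise_lt_pyRange_one _ _).imp ?_
    intro i i' hii' t ht ht'
    have h1 := pv_mem_pvTAi td i t ht
    have h2 := pv_mem_pvTAi td i' t ht'
    omega

lemma pv_allPairs_nodup (ids : List Int) (hs : List.Pairwise (· < ·) ids) :
    (pvAllPairs ids).Nodup := by
  have hnd : ids.Nodup := hs.imp (fun h => ne_of_lt h)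
  unfold pvAllPairs
  rw [List.nodup_flatMap]
  constructor
  · intro a ha
    rw [PySem.List.mem_pyRange_one] at ha
    refine List.Nodup.map_on ?_ (PySem.List.nodup_pyRange_one _ _)
    intro b hb b' hb' hbb'
    rw [PySem.List.mem_pyRange_one] at hb hb'
    have h2 := congrArg Prod.snd hbb'
    simp only at h2
    rw [PySem.List.pyGetD_eq_getElem ids 0 (by omega) (by omega),
      PySem.List.pyGetD_eq_getElem ids 0 (by omega) (by omega)] at h2
    have := (hnd.getElem_inj_iff).1 h2
    omega
  · have hpw := List.Pairwise.and_mem.1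
      (PySem.List.pairwise_lt_pyRange_one 0 (ids.length : Int))
    refine hpw.imp ?_
    rintro a a' ⟨ha, ha', haa'⟩ p hp hq
    rw [PySem.List.mem_pyRange_one] at ha ha'
    obtain ⟨b, hb, hpb⟩ := List.mem_map.1 hp
    obtain ⟨b', hb', hqb⟩ := List.mem_map.1 hq
    rw [PySem.List.mem_pyRange_one] at hb hb'
    have h1 := (congrArg Prod.fst hpb).trans (congrArg Prod.fst hqb).symm
    simp only at h1
    rw [PySem.List.pyGetD_eq_getElem ids 0 (by omega) (by omega),
      PySem.List.pyGetD_eq_getElem ids 0 (by omega) (by omega)] at h1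
    have := (hnd.getElem_inj_iff).1 h1
    omega

lemma pvB_nodup (td : List (List String)) : (pvTB td).Nodup := by
  unfold pvTB
  rw [List.nodup_flatMap]
  constructor
  · intro k _
    unfold pvTBk
    rw [List.nodup_flatMap]
    constructor
    · intro c _
      unfold pvTBc
      refine List.Nodup.map_on ?_ (pv_allPairs_nodup _ (pv_grp_sorted td k c))
      intro p _ q _ hpq
      exact Prod.ext_iff.2 ⟨congrArg (fun t : Int × Int × Int => t.1) hpq,
        congrArg (fun t : Int × Int × Int => t.2.1) hpq⟩
    · have hnd : (pvKys td k).Nodup := PySem.Set.nodup_ofList _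
      refine hnd.imp ?_
      intro c c' hcc' t ht ht'
      have h1 := (pv_mem_pvTBc td k c t ht).2
      have h2 := (pv_mem_pvTBc td k c' t ht').2
      exact hcc' (h1.symm.trans h2)
  · refine (PySem.List.pairwise_lt_pyRange_one _ _).imp ?_
    intro k k' hkk' t ht ht'
    have h1 := pv_mem_pvTBk td k t ht
    have h2 := pv_mem_pvTBk td k' t ht'
    omega

-- ----- order of A's output -----
lemma pvA_pairwise (td : List (List String)) :
    List.Pairwise (fun a b => (fun p : Int × Int => toLex p) a ≤ (fun p : Int × Int => toLex p) b)
      ((pvTA td).map (fun t => (t.1, t.2.1))) := by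
  rw [List.pairwise_map]
  unfold pvTA
  rw [List.pairwise_flatMap]
  constructor
  · intro i _
    unfold pvTAi
    rw [List.pairwise_flatMap]
    constructor
    · intro j _
      unfold pvTAj
      rw [List.pairwise_map]
      refine List.pairwise_of_forall ?_
      intro a b
      exact le_refl _
    · refine (PySem.List.pairwise_lt_pyRange_one _ _).imp ?_
      intro j j' hjj' t ht u hu
      obtain ⟨ht1, ht2⟩ := pv_mem_pvTAj td i j t ht
      obtain ⟨hu1, hu2⟩ := pv_mem_pvTAj td i j' u hu
      rw [Prod.Lex.toLex_le_toLex]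
      right
      exact ⟨by rw [ht1, hu1], by rw [ht2, hu2]; exact le_of_lt hjj'⟩
  · refine (PySem.List.pairwise_lt_pyRange_one _ _).imp ?_
    intro i i' hii' t ht u hu
    have h1 := pv_mem_pvTAi td i t ht
    have h2 := pv_mem_pvTAi td i' u hu
    rw [Prod.Lex.toLex_le_toLex]
    left
    rw [h1, h2]
    exact hii'

-- ===== VERDICT (by name: the statement is the Claim_ definition above) =====
theorem get_conflicting_tracks_py_spec : Claim_equal_get_conflicting_tracks_py := by
  intro td _ _
  unfold Spec_get_conflicting_tracks_py
  rw [pvA_shape, pvB_shape]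
  have hperm : ((pvTA td).map (fun t => (t.1, t.2.1))).Perm
      (PySem.List.sorted ((pvTB td).map (fun t => (t.1, t.2.1))) (fun p => toLex p) false) := by
    refine ((List.Perm.map _ ?_).trans (PySem.List.sorted_perm _ _ _).symm)
    rw [List.perm_ext_iff_of_nodup (pvA_nodup td) (pvB_nodup td)]
    rintro ⟨x, y, k⟩
    rw [pvA_mem, pvB_mem]
  exact PySem.List.eq_of_perm_of_pairwise_le_of_injective (fun p : Int × Int => toLex p)
    toLex.injective hperm (pvA_pairwise td) (PySem.List.sorted_pairwise _ _)
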